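-- pv_equiv track=rewrite | github.com/SGCube/IU7-Python-Programming | sem_2/lab_01/main.py | correct_data3s
-- ===== SOURCE A (Python) =====
-- def correct_data3s(s):
--     if s == "":
--         return False
--     ok = True
--     dot_found = False #найдена ли точка
--     for i in range(len(s)):
--         if not (s[i] == '-' or s[i] == '0' or s[i] == '+'):
--             if s[i] == '.' and (not dot_found):
--                 dot_found = True
--             else:
--                 ok = False
--                 break
--     return ok
-- ===== SOURCE B (Python) =====
-- def _only_signs(p):
--     return all(c in "-0+" for c in p)
--
-- def correct_data3s(s):
--     if s == "":
--         return False
--     head, sep, tail = s.partition('.')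
--     if sep == "":
--         return _only_signs(s)
--     return _only_signs(head) and _only_signs(tail) and '.' not in tail
-- ===== Notes on version B (the rewrite author's own statement) =====
-- stated objective: alternative
-- what changed: Replaced the early-exit index loop carrying ok/dot_found flags with a divide-and-check: partition the string at the first dot, then validate each side against the three dot-free allowed characters and require no dot in the tail.
import Mathlib
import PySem

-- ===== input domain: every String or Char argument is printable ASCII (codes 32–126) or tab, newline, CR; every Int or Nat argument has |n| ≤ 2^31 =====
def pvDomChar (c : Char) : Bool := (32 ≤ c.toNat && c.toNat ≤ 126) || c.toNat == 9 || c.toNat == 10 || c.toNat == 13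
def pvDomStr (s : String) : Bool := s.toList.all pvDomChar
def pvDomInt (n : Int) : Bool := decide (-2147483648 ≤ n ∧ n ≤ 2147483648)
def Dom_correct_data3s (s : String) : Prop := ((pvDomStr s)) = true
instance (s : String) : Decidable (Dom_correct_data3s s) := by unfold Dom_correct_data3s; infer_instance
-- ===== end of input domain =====

-- B replaces A's flag-carrying early-exit scan with a divide-and-check: partition at the first dot, validate each side against the dot-free alphabet.

-- ===== PORT A =====
-- A's for-loop over indices with the dot_found flag and break, as structural recursion over the characters.
def pvLoopA : List Char → Bool → Bool
  | [], _ => true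
  | c :: rest, dotFound =>
    if ¬ (c = '-' ∨ c = '0' ∨ c = '+') then
      if c = '.' ∧ ¬ dotFound then pvLoopA rest true
      else false  -- ok = False; break
    else pvLoopA rest dotFound

def correct_data3s (s : String) : Bool :=
  if s = "" then false
  else pvLoopA s.toList false

-- ===== PORT B =====
-- Source B's s.partition('.') for the single-char separator '.', hand-ported (exact for a one-char separator):
-- returns (chars before the first '.', none) if there is no '.', else (prefix, some suffix).
def pvPartitionDot : List Char → List Char × Option (List Char)
  | [] => ([], none)
  | c :: rest =>
    if c = '.' then ([], some rest)
    else
      let (h, t) := pvPartitionDot rest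
      (c :: h, t)

-- Source B's _only_signs: all(c in "-0+" for c in p)
def pvOnlySigns (p : List Char) : Bool := p.all fun c => c = '-' || c = '0' || c = '+'

def correct_data3s_alt (s : String) : Bool :=
  if s = "" then false
  else
    match pvPartitionDot s.toList with
    | (_, none) => pvOnlySigns s.toList                                  -- sep == "": no dot at all
    | (h, some t) => pvOnlySigns h && pvOnlySigns t && !(t.contains '.')

-- ===== PRECONDITION & SPEC =====
def Spec_correct_data3s (s : String) (out : Bool) : Prop := out = correct_data3s_alt s
instance (s : String) (out : Bool) : Decidable (Spec_correct_data3s s out) := by unfold Spec_correct_data3s; infer_instance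

-- ===== CLAIM =====
def Claim_equal_correct_data3s : Prop := ∀ (s : String), Dom_correct_data3s s → Spec_correct_data3s s (correct_data3s s)

-- ===== LEMMAS AND PROOFS =====
-- A's loop computes "every char in {-,0,+,.} and at most one dot (counting dotFound)".
theorem pvLoopA_eq (l : List Char) (dotFound : Bool) :
    pvLoopA l dotFound =
      ((l.all fun c => c = '-' || c = '0' || c = '+' || c = '.')
        && decide (l.count '.' + (if dotFound then 1 else 0) ≤ 1)) := by
  induction l generalizing dotFound with
  | nil => simp [pvLoopA]; split <;> simp
  | cons c rest ih =>
    by_cases h1 : c = '-' ∨ c = '0' ∨ c = '+'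
    · rcases h1 with h | h | h <;> subst h <;> simp [pvLoopA, ih]
    · by_cases h2 : c = '.'
      · subst h2
        cases dotFound with
        | false => simp [pvLoopA, ih]
        | true => simp [pvLoopA]
      · have h1' : ¬ c = '-' ∧ ¬ c = '0' ∧ ¬ c = '+' := by tauto
        simp [pvLoopA, h1'.1, h1'.2.1, h1'.2.2, h2]

-- a dot-free string is signs-only iff it lies in the four-char alphabet, and then it has no dots to count
theorem succ_le_one_iff (n : Nat) : decide (n + 1 ≤ 1) = decide (n = 0) := by
  cases n <;> simp

theorem onlySigns_nodot (t : List Char) :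
    (pvOnlySigns t && !(t.contains '.')) =
      ((t.all fun c => c = '-' || c = '0' || c = '+' || c = '.') && decide (t.count '.' = 0)) := by
  induction t with
  | nil => simp [pvOnlySigns]
  | cons c rest ih =>
    simp only [List.contains_eq_mem] at ih ⊢
    by_cases h : c = '.'
    · subst h; simp [pvOnlySigns]
    · simp only [pvOnlySigns, List.all_cons, List.count_cons, List.mem_cons] at ih ⊢
      by_cases hc : (c = '-' ∨ c = '0' ∨ c = '+')
      · rcases hc with h' | h' | h' <;> subst h' <;> simp [ih]
      · have h1' : ¬ c = '-' ∧ ¬ c = '0' ∧ ¬ c = '+' := by tauto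
        simp [h1'.1, h1'.2.1, h1'.2.2, h]

-- B's partition-and-check equals A's loop-characterisation
theorem partCheck_eq (l : List Char) :
    (match pvPartitionDot l with
     | (_, none) => pvOnlySigns l
     | (h, some t) => pvOnlySigns h && pvOnlySigns t && !(t.contains '.')) =
      ((l.all fun c => c = '-' || c = '0' || c = '+' || c = '.') && decide (l.count '.' ≤ 1)) := by
  induction l with
  | nil => simp [pvPartitionDot, pvOnlySigns]
  | cons c rest ih =>
    by_cases h : c = '.'
    · subst h
      rw [show pvPartitionDot ('.' :: rest) = ([], some rest) from by simp [pvPartitionDot]]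
      have hred : (match (([] : List Char), some rest) with
          | (_, none) => pvOnlySigns ('.' :: rest)
          | (h, some t) => pvOnlySigns h && pvOnlySigns t && !(t.contains '.'))
          = (pvOnlySigns [] && (pvOnlySigns rest && !(rest.contains '.'))) := rfl
      rw [hred, show pvOnlySigns [] = true from rfl, Bool.true_and, onlySigns_nodot rest]
      simp only [List.all_cons, List.count_cons]
      rw [show (List.count '.' rest + if (('.' : Char) == '.') = true then 1 else 0)
            = List.count '.' rest + 1 from by simp, succ_le_one_iff]
      simp
    · cases hp : pvPartitionDot rest with
      | mk hh tt =>
        rw [hp] at ih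
        simp only [pvPartitionDot, if_neg h, hp]
        cases tt with
        | none =>
          simp only at ih
          have hgoal : pvOnlySigns (c :: rest)
              = ((c = '-' || c = '0' || c = '+') && pvOnlySigns rest) := by
            simp [pvOnlySigns]
          rw [hgoal, ih]
          simp [h, Bool.and_assoc]
        | some t =>
          simp only at ih
          rw [show (match (c :: hh, some t) with
              | (_, none) => pvOnlySigns (c :: rest)
              | (h, some t) => pvOnlySigns h && pvOnlySigns t && !(t.contains '.'))
              = (pvOnlySigns (c :: hh) && pvOnlySigns t && !(t.contains '.')) from rfl]
          have hgoal : (pvOnlySigns (c :: hh) && pvOnlySigns t && !(t.contains '.'))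
              = ((c = '-' || c = '0' || c = '+') && (pvOnlySigns hh && pvOnlySigns t && !(t.contains '.'))) := by
            simp [pvOnlySigns, Bool.and_assoc]
          rw [hgoal, ih]
          simp [h, Bool.and_assoc]

-- ===== VERDICT =====
theorem correct_data3s_spec : Claim_equal_correct_data3s := by
  intro s _
  unfold Spec_correct_data3s correct_data3s correct_data3s_alt
  by_cases hs : s = ""
  · simp [hs]
  · simp only [if_neg hs]
    rw [pvLoopA_eq, partCheck_eq]
    simp
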